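-- pv_equiv track=rewrite | github.com/bseverns/classhub | services/classhub/hub/services/helper_topics.py | split_helper_topics_text
-- ===== SOURCE A (Python) =====
-- def split_helper_topics_text(raw: str) -> list[str]:
--     parts: list[str] = []
--     normalized = (raw or "").replace("\r\n", "\n").replace("\r", "\n")
--     for line in normalized.split("\n"):
--         for segment in line.split("|"):
--             token = segment.strip()
--             if token:
--                 parts.append(token)
--     return parts
-- ===== SOURCE B (Python) =====
-- def split_helper_topics_text(raw: str) -> list[str]:
--     # Single left-to-right pass with a character buffer: no normalization pass,
--     # no intermediate split lists.
--     parts: list[str] = []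
--     buf: list[str] = []
--     for ch in raw or "":
--         if ch in "\r\n|":
--             token = "".join(buf).strip()
--             if token:
--                 parts.append(token)
--             buf = []
--         else:
--             buf.append(ch)
--     token = "".join(buf).strip()
--     if token:
--         parts.append(token)
--     return parts
-- ===== Notes on version B (the rewrite author's own statement) =====
-- stated objective: alternative
-- what changed: Replaced the normalize-then-nested-split pipeline (replace \r\n/\r, split on newlines, split each line on pipes) by a single left-to-right pass over the characters with an explicit token buffer that flushes a stripped non-empty token at every delimiter.
import Mathlib
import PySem

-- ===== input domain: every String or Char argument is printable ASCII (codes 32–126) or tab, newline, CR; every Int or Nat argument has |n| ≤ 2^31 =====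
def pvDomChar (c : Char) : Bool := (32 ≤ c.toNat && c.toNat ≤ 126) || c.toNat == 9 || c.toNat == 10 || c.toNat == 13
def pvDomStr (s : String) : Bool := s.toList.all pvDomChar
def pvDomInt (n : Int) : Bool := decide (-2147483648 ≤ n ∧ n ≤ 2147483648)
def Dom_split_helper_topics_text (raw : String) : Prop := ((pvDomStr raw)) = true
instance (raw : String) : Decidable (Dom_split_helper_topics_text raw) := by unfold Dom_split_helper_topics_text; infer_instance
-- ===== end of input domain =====

-- B replaces A's normalize-then-nested-split pipeline by one pass with a token buffer (alternative decomposition, same O(n) cost).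

-- ===== PORT A =====
-- A's `(raw or "")` is `raw` itself for strings (`"" or ""` is `""`); the splits on the
-- non-empty literal separators "\n" / "|" are exact as PySem.Chars.splitOn on the char lists.
def split_helper_topics_text (raw : String) : List String :=
  let normalized := PySem.Str.replace (PySem.Str.replace raw "\r\n" "\n") "\r" "\n"
  (PySem.Chars.splitOn normalized.toList ['\n']).foldl
    (fun parts line =>
      (PySem.Chars.splitOn line ['|']).foldl
        (fun parts segment =>
          let token := PySem.Chars.strip segment
          if token ≠ [] then parts ++ [String.ofList token] else parts)
        parts)
    []

-- ===== PORT B =====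
def pvIsDelim (c : Char) : Bool := c == '\r' || c == '\n' || c == '|'

-- `token = "".join(buf).strip(); if token: parts.append(token)` as a list of 0 or 1 tokens
def pvEmit (buf : List Char) : List String :=
  let token := PySem.Chars.strip buf
  if token ≠ [] then [String.ofList token] else []

def split_helper_topics_text_alt (raw : String) : List String :=
  let st := raw.toList.foldl
    (fun (st : List String × List Char) ch =>
      if pvIsDelim ch then (st.1 ++ pvEmit st.2, []) else (st.1, st.2 ++ [ch]))
    ([], [])
  st.1 ++ pvEmit st.2

-- ===== PRECONDITION & SPEC =====
def Spec_split_helper_topics_text (raw : String) (out : List String) : Prop := out = split_helper_topics_text_alt raw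
instance (raw : String) (out : List String) : Decidable (Spec_split_helper_topics_text raw out) := by unfold Spec_split_helper_topics_text; infer_instance

-- ===== CLAIM (what is proved, stated in full; the proofs are below) =====
def Claim_equal_split_helper_topics_text : Prop := ∀ (raw : String), Dom_split_helper_topics_text raw → Spec_split_helper_topics_text raw (split_helper_topics_text raw)

-- ===== LEMMAS AND PROOFS =====

-- Reference tokenizer both ports are reduced to: buffer-and-flush over the raw characters.
def pvToks : List Char → List Char → List String
  | buf, [] => pvEmit buf
  | buf, c :: cs => if pvIsDelim c then pvEmit buf ++ pvToks [] cs else pvToks (buf ++ [c]) cs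

-- split on a single delimiter character, structurally
def pvSplitc (d : Char) : List Char → List (List Char)
  | [] => [[]]
  | c :: cs => if c = d then [] :: pvSplitc d cs else (pvSplitc d cs).modifyHead (c :: ·)

def pvConsHead (pre : List Char) : List (List Char) → List (List Char)
  | [] => [pre]
  | x :: xs => (pre ++ x) :: xs

-- replace "\r\n" → "\n", structurally
def pvRep2 : List Char → List Char
  | [] => []
  | [c] => [c]
  | c :: c2 :: t => if c = '\r' ∧ c2 = '\n' then '\n' :: pvRep2 t else c :: pvRep2 (c2 :: t)

def pvFCR (c : Char) : Char := if c = '\r' then '\n' else c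

theorem pvConsHead_cons (pre x : List Char) (xs : List (List Char)) :
    pvConsHead pre (x :: xs) = (pre ++ x) :: xs := rfl

theorem pvSplitc_ne_nil (d : Char) (l : List Char) : pvSplitc d l ≠ [] := by
  induction l with
  | nil => simp [pvSplitc]
  | cons c cs ih =>
    simp only [pvSplitc]
    split
    · simp
    · cases h : pvSplitc d cs with
      | nil => exact absurd h ih
      | cons x xs => simp [List.modifyHead]

theorem pvConsHead_modify (pre : List Char) (c : Char) (s : List (List Char)) (h : s ≠ []) :
    pvConsHead pre (s.modifyHead (c :: ·)) = pvConsHead (pre ++ [c]) s := by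
  cases s with
  | nil => exact absurd rfl h
  | cons x xs => simp [pvConsHead, List.modifyHead]

theorem pvConsHead_nil (s : List (List Char)) (h : s ≠ []) : pvConsHead [] s = s := by
  cases s with
  | nil => exact absurd rfl h
  | cons x xs => simp [pvConsHead]

theorem pvSplitOn_go_eq (d : Char) : ∀ (fuel : Nat) (l cur : List Char) (acc : List (List Char)),
    l.length ≤ fuel →
    PySem.Chars.splitOn.go [d] fuel l cur acc = acc.reverse ++ pvConsHead cur.reverse (pvSplitc d l) := by
  intro fuel
  induction fuel with
  | zero =>
    intro l cur acc h
    have : l = [] := List.length_eq_zero_iff.mp (Nat.le_zero.mp h)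
    subst this
    simp [PySem.Chars.splitOn.go, pvSplitc, pvConsHead]
  | succ f ih =>
    intro l cur acc h
    cases l with
    | nil => simp [PySem.Chars.splitOn.go, pvSplitc, pvConsHead]
    | cons c rest =>
      simp only [PySem.Chars.splitOn.go]
      by_cases hc : c = d
      · subst hc
        rw [if_pos (by simp [List.isPrefixOf])]
        simp only [List.length_cons, List.length_nil, List.drop_succ_cons, List.drop_zero]
        rw [ih rest [] (cur.reverse :: acc) (by simpa using Nat.le_of_succ_le_succ h)]
        simp [pvSplitc, pvConsHead_cons,
          pvConsHead_nil _ (pvSplitc_ne_nil c rest)]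
      · rw [if_neg (by simp [List.isPrefixOf]; exact fun hdc => hc hdc.symm)]
        rw [ih rest (c :: cur) acc (by simpa using Nat.le_of_succ_le_succ h)]
        simp [pvSplitc, hc, pvConsHead_modify _ _ _ (pvSplitc_ne_nil d rest)]

theorem pvSplitOn_eq (d : Char) (l : List Char) :
    PySem.Chars.splitOn l [d] = pvSplitc d l := by
  unfold PySem.Chars.splitOn
  rw [pvSplitOn_go_eq d (l.length + 1) l [] [] (Nat.le_succ _)]
  simp [pvConsHead_nil _ (pvSplitc_ne_nil d l)]

theorem pvRep2_cons_cons (c c2 : Char) (t : List Char) :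
    pvRep2 (c :: c2 :: t) =
      if c = '\r' ∧ c2 = '\n' then '\n' :: pvRep2 t else c :: pvRep2 (c2 :: t) := by
  simp [pvRep2]

theorem pvReplace_go_rep2 : ∀ (fuel : Nat) (l acc : List Char), l.length ≤ fuel →
    PySem.Chars.replace.go ['\r', '\n'] ['\n'] fuel l acc = acc.reverse ++ pvRep2 l := by
  intro fuel
  induction fuel with
  | zero =>
    intro l acc h
    have : l = [] := List.length_eq_zero_iff.mp (Nat.le_zero.mp h)
    subst this
    simp [PySem.Chars.replace.go, pvRep2]
  | succ f ih =>
    intro l acc h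
    cases l with
    | nil => simp [PySem.Chars.replace.go, pvRep2]
    | cons c rest =>
      simp only [PySem.Chars.replace.go]
      cases rest with
      | nil =>
        rw [if_neg (by simp [List.isPrefixOf])]
        rw [ih [] (c :: acc) (by simp)]
        simp [pvRep2]
      | cons c2 t =>
        by_cases hp : c = '\r' ∧ c2 = '\n'
        · obtain ⟨h1, h2⟩ := hp
          subst h1; subst h2
          rw [if_pos (by simp [List.isPrefixOf])]
          simp only [List.length_cons, List.length_nil, List.drop_succ_cons, List.drop_zero,
            List.reverse_cons, List.reverse_nil, List.nil_append, List.singleton_append]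
          rw [ih t (('\n' : Char) :: acc) (by simp at h ⊢; omega)]
          rw [pvRep2_cons_cons]
          simp
        · rw [if_neg (by simp [List.isPrefixOf]; intro h1 h2; exact hp ⟨h1.symm, h2.symm⟩)]
          rw [ih (c2 :: t) (c :: acc) (by simpa using Nat.le_of_succ_le_succ h)]
          rw [pvRep2_cons_cons, if_neg hp]
          simp

theorem pvReplace_crlf (l : List Char) :
    PySem.Chars.replace l ['\r', '\n'] ['\n'] = pvRep2 l := by
  unfold PySem.Chars.replace
  rw [if_neg (by simp)]
  simpa using pvReplace_go_rep2 l.length l [] le_rfl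

theorem pvReplace_go_cr : ∀ (fuel : Nat) (l acc : List Char), l.length ≤ fuel →
    PySem.Chars.replace.go ['\r'] ['\n'] fuel l acc = acc.reverse ++ l.map pvFCR := by
  intro fuel
  induction fuel with
  | zero =>
    intro l acc h
    have : l = [] := List.length_eq_zero_iff.mp (Nat.le_zero.mp h)
    subst this
    simp [PySem.Chars.replace.go]
  | succ f ih =>
    intro l acc h
    cases l with
    | nil => simp [PySem.Chars.replace.go]
    | cons c rest =>
      simp only [PySem.Chars.replace.go]
      by_cases hc : c = '\r'
      · subst hc
        rw [if_pos (by simp [List.isPrefixOf])]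
        simp only [List.length_cons, List.length_nil, List.drop_succ_cons, List.drop_zero,
          List.reverse_cons, List.reverse_nil, List.nil_append, List.singleton_append]
        rw [ih rest (('\n' : Char) :: acc) (by simpa using Nat.le_of_succ_le_succ h)]
        simp [pvFCR]
      · rw [if_neg (by simp [List.isPrefixOf]; exact fun hdc => hc hdc.symm)]
        rw [ih rest (c :: acc) (by simpa using Nat.le_of_succ_le_succ h)]
        simp [pvFCR, hc]

theorem pvReplace_cr (l : List Char) :
    PySem.Chars.replace l ['\r'] ['\n'] = l.map pvFCR := by
  unfold PySem.Chars.replace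
  rw [if_neg (by simp)]
  simpa using pvReplace_go_cr l.length l [] le_rfl

theorem pvEmit_nil : pvEmit [] = [] := by
  simp [pvEmit, PySem.Chars.strip, PySem.Chars.lstrip, PySem.Chars.rstrip]

-- A's inner loop body appends exactly the 0-or-1 token list pvEmit produces
theorem pvF_eq (parts : List String) (seg : List Char) :
    (if PySem.Chars.strip seg ≠ [] then parts ++ [String.ofList (PySem.Chars.strip seg)] else parts)
      = parts ++ pvEmit seg := by
  simp only [pvEmit]
  split <;> simp

theorem pvToks_append_delim (d : Char) (hd : pvIsDelim d = true) :
    ∀ (u b v : List Char), pvToks b (u ++ d :: v) = pvToks b u ++ pvToks [] v := by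
  intro u
  induction u with
  | nil => intro b v; simp [pvToks, hd]
  | cons c u' ih =>
    intro b v
    simp only [List.cons_append, pvToks]
    by_cases hc : pvIsDelim c = true
    · simp [hc, ih]
    · simp [hc, ih]

theorem pvToks_map_fcr : ∀ (cs b : List Char), pvToks b (cs.map pvFCR) = pvToks b cs := by
  intro cs
  induction cs with
  | nil => intro b; simp
  | cons c t ih =>
    intro b
    by_cases hc : c = '\r'
    · subst hc
      simp [pvToks, pvFCR, pvIsDelim, ih]
    · have hf : pvFCR c = c := by simp [pvFCR, hc]
      simp only [List.map_cons, hf, pvToks]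
      by_cases hdc : pvIsDelim c = true <;> simp [hdc, ih]

theorem pvSplitc_cons_self (d : Char) (t : List Char) :
    pvSplitc d (d :: t) = [] :: pvSplitc d t := by simp [pvSplitc]

theorem pvSplitc_cons_ne (d c : Char) (t : List Char) (hc : c ≠ d) :
    pvSplitc d (c :: t) = (pvSplitc d t).modifyHead (c :: ·) := by simp [pvSplitc, hc]

theorem pvToks_rep2 (cs : List Char) : ∀ b, pvToks b (pvRep2 cs) = pvToks b cs := by
  induction cs using pvRep2.induct with
  | case1 => intro b; simp [pvRep2]
  | case2 c => intro b; simp [pvRep2]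
  | case3 c c2 t hp ih =>
    intro b
    obtain ⟨h1, h2⟩ := hp
    subst h1; subst h2
    rw [pvRep2_cons_cons, if_pos ⟨rfl, rfl⟩]
    simp [pvToks, pvIsDelim, pvEmit_nil, ih]
  | case4 c c2 t hp ih =>
    intro b
    rw [pvRep2_cons_cons, if_neg hp]
    simp only [pvToks]
    by_cases hdc : pvIsDelim c = true <;> simp [hdc, ih, pvToks]

theorem pv_inner_fold : ∀ (line buf : List Char) (parts : List String),
    (∀ c ∈ line, c ≠ '\n' ∧ c ≠ '\r') →
    (pvConsHead buf (pvSplitc '|' line)).foldl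
      (fun parts segment =>
        let token := PySem.Chars.strip segment
        if token ≠ [] then parts ++ [String.ofList token] else parts) parts
      = parts ++ pvToks buf line := by
  intro line
  induction line with
  | nil =>
    intro buf parts _
    simp only [pvSplitc, pvConsHead_cons, List.append_nil, List.foldl_cons, List.foldl_nil, pvToks]
    exact pvF_eq parts buf
  | cons c t ih =>
    intro buf parts hl
    have ht : ∀ x ∈ t, x ≠ '\n' ∧ x ≠ '\r' := fun x hx => hl x (List.mem_cons_of_mem _ hx)
    by_cases hc : c = '|'
    · subst hc
      rw [pvSplitc_cons_self, pvConsHead_cons, List.append_nil, List.foldl_cons]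
      rw [pvF_eq]
      rw [← pvConsHead_nil _ (pvSplitc_ne_nil '|' t)]
      rw [ih [] (parts ++ pvEmit buf) ht]
      simp [pvToks, pvIsDelim]
    · have hcn := hl c List.mem_cons_self
      have hnd : pvIsDelim c = false := by
        simp [pvIsDelim, hc, hcn.1, hcn.2]
      rw [pvSplitc_cons_ne _ _ _ hc, pvConsHead_modify _ _ _ (pvSplitc_ne_nil _ _)]
      rw [ih (buf ++ [c]) parts ht]
      simp [pvToks, hnd]

theorem pv_outer_fold : ∀ (l buf : List Char) (parts : List String),
    '\r' ∉ l → (∀ c ∈ buf, c ≠ '\n' ∧ c ≠ '\r') →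
    (pvConsHead buf (pvSplitc '\n' l)).foldl
      (fun parts line =>
        (PySem.Chars.splitOn line ['|']).foldl
          (fun parts segment =>
            let token := PySem.Chars.strip segment
            if token ≠ [] then parts ++ [String.ofList token] else parts) parts) parts
      = parts ++ pvToks [] (buf ++ l) := by
  intro l
  induction l with
  | nil =>
    intro buf parts _ hbuf
    simp only [pvSplitc, pvConsHead_cons, List.append_nil, List.foldl_cons, List.foldl_nil]
    rw [pvSplitOn_eq, ← pvConsHead_nil _ (pvSplitc_ne_nil '|' buf)]
    exact pv_inner_fold buf [] parts hbuf
  | cons c t ih =>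
    intro buf parts hr hbuf
    have hrt : '\r' ∉ t := fun hx => hr (List.mem_cons_of_mem _ hx)
    by_cases hc : c = '\n'
    · subst hc
      rw [pvSplitc_cons_self, pvConsHead_cons, List.append_nil, List.foldl_cons]
      rw [pvSplitOn_eq, ← pvConsHead_nil _ (pvSplitc_ne_nil '|' buf)]
      rw [pv_inner_fold buf [] parts hbuf]
      rw [← pvConsHead_nil _ (pvSplitc_ne_nil '\n' t)]
      rw [ih [] (parts ++ pvToks [] buf) hrt (by simp)]
      rw [pvToks_append_delim '\n' (by simp [pvIsDelim]) buf [] t]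
      simp
    · have hcr : c ≠ '\r' := fun h => hr (h ▸ List.mem_cons_self)
      rw [pvSplitc_cons_ne _ _ _ hc, pvConsHead_modify _ _ _ (pvSplitc_ne_nil _ _)]
      rw [ih (buf ++ [c]) parts hrt ?hb]
      · simp
      case hb =>
        intro x hx
        rcases List.mem_append.mp hx with h | h
        · exact hbuf x h
        · simp at h; subst h; exact ⟨hc, hcr⟩

theorem pv_b_fold : ∀ (cs : List Char) (parts : List String) (buf : List Char),
    (let st := cs.foldl
      (fun (st : List String × List Char) ch =>
        if pvIsDelim ch then (st.1 ++ pvEmit st.2, []) else (st.1, st.2 ++ [ch]))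
      (parts, buf)
     st.1 ++ pvEmit st.2) = parts ++ pvToks buf cs := by
  intro cs
  induction cs with
  | nil => intro parts buf; simp [pvToks]
  | cons c t ih =>
    intro parts buf
    simp only [List.foldl_cons, pvToks]
    by_cases hc : pvIsDelim c = true
    · simp only [hc, if_true]
      rw [ih (parts ++ pvEmit buf) []]
      simp
    · simp only [hc, Bool.false_eq_true, if_false]
      rw [ih parts (buf ++ [c])]

theorem pv_no_cr_map (l : List Char) : '\r' ∉ l.map pvFCR := by
  intro h
  rcases List.mem_map.mp h with ⟨c, _, hc⟩
  by_cases hcc : c = '\r' <;> simp [pvFCR, hcc] at hc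

-- ===== VERDICT (by name: the statement is the Claim_ definition above) =====
theorem split_helper_topics_text_spec : Claim_equal_split_helper_topics_text := by
  intro raw _
  unfold Spec_split_helper_topics_text split_helper_topics_text split_helper_topics_text_alt
  have hn : (PySem.Str.replace (PySem.Str.replace raw "\r\n" "\n") "\r" "\n").toList
      = (pvRep2 raw.toList).map pvFCR := by
    rw [PySem.Str.toList_replace, PySem.Str.toList_replace]
    rw [show ("\r\n" : String).toList = ['\r', '\n'] from rfl,
        show ("\r" : String).toList = ['\r'] from rfl,
        show ("\n" : String).toList = ['\n'] from rfl]
    rw [pvReplace_crlf, pvReplace_cr]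
  simp only [hn]
  rw [pvSplitOn_eq, ← pvConsHead_nil _ (pvSplitc_ne_nil '\n' _)]
  rw [pv_outer_fold _ [] [] (pv_no_cr_map _) (by simp)]
  rw [pv_b_fold raw.toList [] []]
  simp [pvToks_map_fcr, pvToks_rep2]
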